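-- pv_equiv track=rewrite | github.com/erickummelstedt/ubiquitinformatics | back_end/src/all_atom/later_development/labeling_backbones.py | check_atoms_on_c3
-- ===== SOURCE A (Python) =====
-- def check_atoms_on_c3(input_atom_types, aa_position = 'individual'):
--     ## should probably test this lol
--     if aa_position == 'individual':
--         desired_atom_types_list= [['C.2', 'H', 'N.3'], ['C.2', 'H', 'N.4']] ## create for loop
--     elif aa_position  == 'n_terminus':
--         desired_atom_types_list= [['C.2', 'H', 'N.3'], ['C.2', 'H', 'N.4']] ## create for loop
--     elif aa_position  == 'c_terminus':
--         desired_atom_types_list= [['C.2', 'H', 'N.am']]  ## create for loop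
--     elif aa_position  == 'double_bonded_peptide':
--         desired_atom_types_list= [['C.2', 'H', 'N.am']]  ## create for loop
--
--     for desired_atom_types in desired_atom_types_list:
--         input_copy = input_atom_types.copy()
--         desired_copy = desired_atom_types.copy()
--         ## check len of both lists is the same
--         if (len(desired_atom_types)+1) == len(input_atom_types):
--             for i in desired_atom_types:
--                 removable_atom = desired_copy.pop()
--                 if removable_atom in input_copy:
--                     input_copy.remove(removable_atom)
--         else:
--             outcome = False
--
--         if len(input_copy) == 1 and input_atom_types != []:
--             outcome = True
--             break
--         else:
--             outcome = False
--     return outcome == True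
-- ===== SOURCE B (Python) =====
-- def check_atoms_on_c3(input_atom_types, aa_position='individual'):
--     if aa_position == 'individual':
--         desired_atom_types_list = [['C.2', 'H', 'N.3'], ['C.2', 'H', 'N.4']]
--     elif aa_position == 'n_terminus':
--         desired_atom_types_list = [['C.2', 'H', 'N.3'], ['C.2', 'H', 'N.4']]
--     elif aa_position == 'c_terminus':
--         desired_atom_types_list = [['C.2', 'H', 'N.am']]
--     elif aa_position == 'double_bonded_peptide':
--         desired_atom_types_list = [['C.2', 'H', 'N.am']]
--     return any(
--         len(input_atom_types) == len(desired) + 1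
--         and all(atom in input_atom_types for atom in desired)
--         for desired in desired_atom_types_list
--     )
-- ===== Notes on version B (the rewrite author's own statement) =====
-- stated objective: simpler
-- what changed: Replaces A's per-pattern copy/pop()/remove()/leftover-count mutation loop by a direct 'length == pattern length + 1 and every pattern atom is present' test via any/all (valid because each pattern's atoms are distinct).
-- intended difference: On any single-element input list (with a valid aa_position) A returns True regardless of the atom, because the length-mismatch branch leaves input_copy untouched and 'len(input_copy) == 1' then fires; B returns False, the intended value since every pattern requires its 3 atoms plus one extra. — e.g. on check_atoms_on_c3(["O"], "individual"): A returns true, B returns false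
import Mathlib
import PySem

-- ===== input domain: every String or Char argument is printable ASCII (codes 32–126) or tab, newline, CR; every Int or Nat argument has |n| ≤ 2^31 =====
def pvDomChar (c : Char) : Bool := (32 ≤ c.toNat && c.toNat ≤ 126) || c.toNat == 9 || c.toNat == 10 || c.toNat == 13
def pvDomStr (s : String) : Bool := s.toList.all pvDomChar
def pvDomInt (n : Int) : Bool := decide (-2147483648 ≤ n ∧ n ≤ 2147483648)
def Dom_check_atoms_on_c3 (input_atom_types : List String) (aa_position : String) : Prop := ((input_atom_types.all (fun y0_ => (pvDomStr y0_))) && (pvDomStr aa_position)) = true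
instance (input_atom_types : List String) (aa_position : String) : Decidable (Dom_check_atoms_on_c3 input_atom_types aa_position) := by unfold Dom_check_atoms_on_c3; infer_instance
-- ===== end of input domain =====

-- B replaces A's per-pattern copy/pop/remove/leftover-count loop by a direct length+membership test
-- (objective: simpler); on single-element inputs A's length-mismatch branch accidentally returns True,
-- B returns the intended False (see D_ below). Return value only; neither program mutates its arguments.


-- ===== PORT A =====
-- inner 'for i in desired_atom_types' loop: state = (input_copy, desired_copy); pop() last, remove if member
def pvInnerA : List String → List String × List String → List String × List String
  | [], st => st
  | _ :: rest, st =>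
      match PySem.List.pop? st.2 (-1) with
      | none => st  -- Python would raise IndexError; unreachable (desired_copy nonempty at every iteration)
      | some (removable, desired') =>
          let input' :=
            if st.1.contains removable then
              match PySem.List.remove? st.1 removable with
              | some l => l
              | none => st.1  -- unreachable: removable ∈ input_copy
            else st.1
          pvInnerA rest (input', desired')

-- one iteration of A's outer loop body: the final 'len(input_copy) == 1 and input_atom_types != []' test
def pvTestA (input_atom_types : List String) (desired_atom_types : List String) : Bool :=
  let input_copy :=
    if desired_atom_types.length + 1 == input_atom_types.length then
      (pvInnerA desired_atom_types (input_atom_types, desired_atom_types)).1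
    else input_atom_types
  input_copy.length == 1 && input_atom_types != []

-- outer loop with its break; 'false' for the empty pattern list (unreachable inside Pre_)
def pvLoopA : List (List String) → List String → Bool
  | [], _ => false
  | desired :: rest, input => if pvTestA input desired then true else pvLoopA rest input

def check_atoms_on_c3 (input_atom_types : List String) (aa_position : String) : Bool :=
  let desired_atom_types_list :=
    if aa_position == "individual" then [["C.2", "H", "N.3"], ["C.2", "H", "N.4"]]
    else if aa_position == "n_terminus" then [["C.2", "H", "N.3"], ["C.2", "H", "N.4"]]
    else if aa_position == "c_terminus" then [["C.2", "H", "N.am"]]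
    else if aa_position == "double_bonded_peptide" then [["C.2", "H", "N.am"]]
    else []  -- Python raises UnboundLocalError here; excluded by Pre_
  pvLoopA desired_atom_types_list input_atom_types

-- ===== PORT B =====
def check_atoms_on_c3_alt (input_atom_types : List String) (aa_position : String) : Bool :=
  let desired_atom_types_list :=
    if aa_position == "individual" then [["C.2", "H", "N.3"], ["C.2", "H", "N.4"]]
    else if aa_position == "n_terminus" then [["C.2", "H", "N.3"], ["C.2", "H", "N.4"]]
    else if aa_position == "c_terminus" then [["C.2", "H", "N.am"]]
    else if aa_position == "double_bonded_peptide" then [["C.2", "H", "N.am"]]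
    else []  -- Python raises UnboundLocalError here; excluded by Pre_
  desired_atom_types_list.any (fun desired =>
    input_atom_types.length == desired.length + 1 &&
    desired.all (fun atom => input_atom_types.contains atom))

-- ===== PRECONDITION & SPEC =====
-- Pre_ excludes exactly the aa_position values outside A's if/elif chain, on which A (and B) raise UnboundLocalError.
def Pre_check_atoms_on_c3 (input_atom_types : List String) (aa_position : String) : Prop :=
  aa_position = "individual" ∨ aa_position = "n_terminus" ∨
  aa_position = "c_terminus" ∨ aa_position = "double_bonded_peptide"
instance (input_atom_types : List String) (aa_position : String) : Decidable (Pre_check_atoms_on_c3 input_atom_types aa_position) := by unfold Pre_check_atoms_on_c3; infer_instance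

def pvWitness_check_atoms_on_c3 : List String × String := (["C.2", "H", "N.3", "CA"], "individual")

-- On single-element inputs A returns True whatever the atom is (the length check fails, input_copy stays
-- untouched and 'len(input_copy) == 1' fires); B returns False, the intended value since every pattern
-- needs 3 matching atoms plus one extra.
def D_check_atoms_on_c3 (input_atom_types : List String) (aa_position : String) : Prop :=
  input_atom_types.length = 1
instance (input_atom_types : List String) (aa_position : String) : Decidable (D_check_atoms_on_c3 input_atom_types aa_position) := by unfold D_check_atoms_on_c3; infer_instance

def Spec_check_atoms_on_c3 (input_atom_types : List String) (aa_position : String) (out : Bool) : Prop := ¬ D_check_atoms_on_c3 input_atom_types aa_position → out = check_atoms_on_c3_alt input_atom_types aa_position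
instance (input_atom_types : List String) (aa_position : String) (out : Bool) : Decidable (Spec_check_atoms_on_c3 input_atom_types aa_position out) := by unfold Spec_check_atoms_on_c3; infer_instance

def pvDiffWitness_check_atoms_on_c3 : List String × String := (["O"], "individual")
def pvDiffWitnessOut_check_atoms_on_c3 : Bool × Bool := (true, false)

-- ===== CLAIM =====
def Claim_unchanged_check_atoms_on_c3 : Prop := ∀ (input_atom_types : List String) (aa_position : String), Dom_check_atoms_on_c3 input_atom_types aa_position → Pre_check_atoms_on_c3 input_atom_types aa_position → Spec_check_atoms_on_c3 input_atom_types aa_position (check_atoms_on_c3 input_atom_types aa_position)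
def Claim_changed_check_atoms_on_c3 : Prop := Dom_check_atoms_on_c3 (pvDiffWitness_check_atoms_on_c3.1) (pvDiffWitness_check_atoms_on_c3.2) ∧ Pre_check_atoms_on_c3 (pvDiffWitness_check_atoms_on_c3.1) (pvDiffWitness_check_atoms_on_c3.2) ∧ D_check_atoms_on_c3 (pvDiffWitness_check_atoms_on_c3.1) (pvDiffWitness_check_atoms_on_c3.2) ∧ check_atoms_on_c3 (pvDiffWitness_check_atoms_on_c3.1) (pvDiffWitness_check_atoms_on_c3.2) = pvDiffWitnessOut_check_atoms_on_c3.1 ∧ check_atoms_on_c3_alt (pvDiffWitness_check_atoms_on_c3.1) (pvDiffWitness_check_atoms_on_c3.2) = pvDiffWitnessOut_check_atoms_on_c3.2 ∧ pvDiffWitnessOut_check_atoms_on_c3.1 ≠ pvDiffWitnessOut_check_atoms_on_c3.2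
def Claim_exact_check_atoms_on_c3 : Prop := ∀ (input_atom_types : List String) (aa_position : String), Dom_check_atoms_on_c3 input_atom_types aa_position → Pre_check_atoms_on_c3 input_atom_types aa_position → D_check_atoms_on_c3 input_atom_types aa_position → check_atoms_on_c3 input_atom_types aa_position ≠ check_atoms_on_c3_alt input_atom_types aa_position

-- ===== LEMMAS AND PROOFS =====

-- the 'if removable in input_copy: input_copy.remove(removable)' step is List.erase
lemma pvRemoveStep (l : List String) (x : String) :
    (if l.contains x then
      match PySem.List.remove? l x with
      | some l' => l'
      | none => l
     else l) = l.erase x := by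
  by_cases h : x ∈ l
  · simp only [List.contains_eq_mem, h, decide_true, if_true,
      PySem.List.remove?_eq_some_erase l x h]
  · simp [List.contains_eq_mem, h, List.erase_of_not_mem h]

-- pvInnerA on a 3-element pattern erases the three atoms back-to-front
lemma pvInnerA_three (input : List String) (a b c : String) :
    (pvInnerA [a, b, c] (input, [a, b, c])).1 = ((input.erase c).erase b).erase a := by
  simp only [pvInnerA, pvRemoveStep]
  rfl

-- A's per-pattern test equals B's length+membership test for a 3-element pattern of
-- pairwise-distinct atoms, away from the length-1 inputs of D_
lemma pvTestA_eq (input : List String) (hne : input.length ≠ 1)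
    (a b c : String) (hab : a ≠ b) (hac : a ≠ c) (hbc : b ≠ c) :
    pvTestA input [a, b, c] =
      (input.length == [a, b, c].length + 1 &&
        [a, b, c].all (fun atom => input.contains atom)) := by
  unfold pvTestA
  have hbm : b ∈ input.erase c ↔ b ∈ input := List.mem_erase_of_ne hbc
  have ham : a ∈ (input.erase c).erase b ↔ a ∈ input := by
    rw [List.mem_erase_of_ne hab, List.mem_erase_of_ne hac]
  by_cases h4 : input.length = 4
  · have hnil : input ≠ [] := by intro h; rw [h] at h4; simp at h4
    by_cases ha : a ∈ input <;> by_cases hb : b ∈ input <;> by_cases hc : c ∈ input <;>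
      simp [pvInnerA_three input a b c, List.length_erase, ham, hbm, ha, hb, hc, h4, hnil]
  · rw [if_neg (show ¬ ([a, b, c].length + 1 == input.length) = true from by simp; omega)]
    simp [beq_false_of_ne hne]
    exact fun h => absurd h h4

-- ===== VERDICT =====
theorem check_atoms_on_c3_spec : Claim_unchanged_check_atoms_on_c3 := by
  intro input aa _ hpre hnd
  have hne : input.length ≠ 1 := hnd
  have e1 := pvTestA_eq input hne "C.2" "H" "N.3" (by decide) (by decide) (by decide)
  have e2 := pvTestA_eq input hne "C.2" "H" "N.4" (by decide) (by decide) (by decide)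
  have e3 := pvTestA_eq input hne "C.2" "H" "N.am" (by decide) (by decide) (by decide)
  rcases hpre with h | h | h | h <;> subst h <;>
    simp [check_atoms_on_c3, check_atoms_on_c3_alt, pvLoopA, e1, e2, e3, Bool.beq_eq_decide_eq]

theorem check_atoms_on_c3_changed : Claim_changed_check_atoms_on_c3 := by
  unfold Claim_changed_check_atoms_on_c3; decide

theorem check_atoms_on_c3_tight : Claim_exact_check_atoms_on_c3 := by
  intro input aa _ hpre hd
  obtain ⟨x, hx⟩ := List.length_eq_one_iff.mp hd
  subst hx
  rcases hpre with h | h | h | h <;> subst h <;>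
    simp [check_atoms_on_c3, check_atoms_on_c3_alt, pvLoopA, pvTestA]
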